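-- pv_equiv track=rewrite | github.com/fpddmw/https---github.com-fpddmw-eco-concil-runtime | skills/review-evidence-sufficiency/scripts/review_evidence_sufficiency.py | review_posture
-- ===== SOURCE A (Python) =====
-- from typing import Any
--
-- def normalize_space(value: Any) -> str:
--     return " ".join(str(value).split())
--
-- def maybe_text(value: Any) -> str:
--     if value is None:
--         return ""
--     return normalize_space(value)
--
-- def review_posture(notes: list[dict[str, Any]]) -> str:
--     statuses = {maybe_text(note.get("review_status")) for note in notes}
--     if "missing-input" in statuses:
--         return "insufficient-inputs"
--     if "contested" in statuses:
--         return "contested-review"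
--     if "attention-needed" in statuses:
--         return "needs-human-review"
--     return "documented-with-caveats"
-- ===== SOURCE B (Python) =====
-- from typing import Any
--
-- def normalize_space(value: Any) -> str:
--     return " ".join(str(value).split())
--
-- def maybe_text(value: Any) -> str:
--     if value is None:
--         return ""
--     return normalize_space(value)
--
-- _POSTURES = ("insufficient-inputs", "contested-review",
--              "needs-human-review", "documented-with-caveats")
--
-- def _rank(status: str) -> int:
--     if status == "missing-input":
--         return 0
--     if status == "contested":
--         return 1
--     if status == "attention-needed":
--         return 2
--     return 3
--
-- def review_posture(notes: list[dict[str, Any]]) -> str: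
--     rank = 3
--     for note in notes:
--         rank = min(rank, _rank(maybe_text(note.get("review_status"))))
--     return _POSTURES[rank]
-- ===== Notes on version B (the rewrite author's own statement) =====
-- stated objective: alternative
-- what changed: Replaces the intermediate set of normalized statuses plus a chain of membership tests by a single fold that keeps the minimum priority rank per note and indexes a posture table at the end.
import Mathlib
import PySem

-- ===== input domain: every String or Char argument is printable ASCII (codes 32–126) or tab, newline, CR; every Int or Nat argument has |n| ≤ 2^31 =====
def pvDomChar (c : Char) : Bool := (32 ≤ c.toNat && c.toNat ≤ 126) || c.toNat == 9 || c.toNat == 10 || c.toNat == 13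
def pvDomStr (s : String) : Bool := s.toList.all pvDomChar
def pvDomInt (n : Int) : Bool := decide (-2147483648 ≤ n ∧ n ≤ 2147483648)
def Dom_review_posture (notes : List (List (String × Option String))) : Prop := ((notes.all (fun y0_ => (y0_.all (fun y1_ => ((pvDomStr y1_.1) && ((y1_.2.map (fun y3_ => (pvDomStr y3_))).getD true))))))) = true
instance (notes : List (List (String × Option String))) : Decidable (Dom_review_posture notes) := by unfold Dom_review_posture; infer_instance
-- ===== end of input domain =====

-- B replaces A's intermediate status set and membership chain by one fold keeping the minimum priority rank (alternative decomposition, same cost).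

-- ===== PORT A =====
-- shared helpers: both Pythons use the same normalize_space / maybe_text / note.get
def pvNormalizeSpace (s : String) : String := PySem.Str.join " " (PySem.Str.split₀ s)

def pvMaybeText (v : Option String) : String :=
  match v with
  | none => ""
  | some s => pvNormalizeSpace s

-- maybe_text(note.get("review_status")): missing key and stored None both give ""
def pvStatus (note : List (String × Option String)) : String :=
  pvMaybeText (((PySem.Dict.mk note).get? "review_status").join)

def review_posture (notes : List (List (String × Option String))) : String :=
  let statuses : PySem.Set String := PySem.Set.ofList (notes.map pvStatus)
  if "missing-input" ∈ statuses then "insufficient-inputs"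
  else if "contested" ∈ statuses then "contested-review"
  else if "attention-needed" ∈ statuses then "needs-human-review"
  else "documented-with-caveats"

-- ===== PORT B =====
def pvRank (status : String) : Nat :=
  if status = "missing-input" then 0
  else if status = "contested" then 1
  else if status = "attention-needed" then 2
  else 3

def pvPostures : List String :=
  ["insufficient-inputs", "contested-review", "needs-human-review", "documented-with-caveats"]

def review_posture_alt (notes : List (List (String × Option String))) : String :=
  let rank := notes.foldl (fun r note => min r (pvRank (pvStatus note))) 3
  pvPostures.getD rank ""

-- ===== PRECONDITION & SPEC =====
def Spec_review_posture (notes : List (List (String × Option String))) (out : String) : Prop := out = review_posture_alt notes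
instance (notes : List (List (String × Option String))) (out : String) : Decidable (Spec_review_posture notes out) := by unfold Spec_review_posture; infer_instance

-- ===== CLAIM (what is proved, stated in full; the proofs are below) =====
def Claim_equal_review_posture : Prop := ∀ (notes : List (List (String × Option String))), Dom_review_posture notes → Spec_review_posture notes (review_posture notes)

-- ===== LEMMAS AND PROOFS =====

-- the fold of min ranks, characterised by memberships in the status list
def pvChain (L : List String) : Nat :=
  if "missing-input" ∈ L then 0
  else if "contested" ∈ L then 1
  else if "attention-needed" ∈ L then 2
  else 3

theorem pvFold_eq_chain (L : List String) (r : Nat) (hr : r ≤ 3) :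
    L.foldl (fun r s => min r (pvRank s)) r = min r (pvChain L) := by
  induction L generalizing r with
  | nil => simp [pvChain]; omega
  | cons s L ih =>
    rw [List.foldl_cons, ih _ (le_trans (Nat.min_le_left _ _) hr)]
    by_cases h0 : s = "missing-input" <;>
      by_cases h1 : s = "contested" <;>
        by_cases h2 : s = "attention-needed" <;>
          simp only [pvChain, pvRank, List.mem_cons, h0, h1, h2, if_pos, true_or] <;>
          split_ifs <;> simp_all

theorem review_posture_eq (notes : List (List (String × Option String))) :
    review_posture notes = review_posture_alt notes := by
  unfold review_posture review_posture_alt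
  have hfold : notes.foldl (fun r note => min r (pvRank (pvStatus note))) 3
      = pvChain (notes.map pvStatus) := by
    rw [← List.foldl_map (f := pvStatus) (g := fun r s => min r (pvRank s))]
    rw [pvFold_eq_chain _ _ le_rfl]
    unfold pvChain
    split_ifs <;> omega
  simp only [hfold]
  unfold pvChain
  simp only [PySem.Set.mem_ofList]
  split_ifs <;> rfl

-- ===== VERDICT (by name: the statement is the Claim_ definition above) =====
theorem review_posture_spec : Claim_equal_review_posture := by
  intro notes _
  exact review_posture_eq notes
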